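-- pv_equiv track=rewrite | github.com/PDHung1104/why-not-provenance | firing_rules/why_not_provenance.py | _split_top_level_and
-- ===== SOURCE A (Python) =====
-- from typing import Any, Dict, List, Optional, Sequence, Tuple
--
-- def _split_top_level_and(s: str) -> List[str]:
--     """Split SQL boolean conjunctions at top-level AND only."""
--
--     parts: List[str] = []
--     buf: List[str] = []
--     depth = 0
--     i = 0
--     upper = s.upper()
--     while i < len(s):
--         ch = s[i]
--         if ch == "(":
--             depth += 1
--         elif ch == ")":
--             depth -= 1
--
--         if depth == 0 and upper[i : i + 3] == "AND":
--             left_ok = i == 0 or upper[i - 1].isspace()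
--             right_ok = i + 3 >= len(s) or upper[i + 3].isspace()
--             if left_ok and right_ok:
--                 piece = "".join(buf).strip()
--                 if piece:
--                     parts.append(piece)
--                 buf = []
--                 i += 3
--                 continue
--
--         buf.append(ch)
--         i += 1
--
--     tail = "".join(buf).strip()
--     if tail:
--         parts.append(tail)
--     return parts
-- ===== SOURCE B (Python) =====
-- from typing import List
--
--
-- def _split_top_level_and(s: str) -> List[str]:
--     """Split SQL boolean conjunctions at top-level AND only."""
--
--     n = len(s)
--     up = s.upper()
--     depth = [0]
--     for ch in s:
--         depth.append(depth[-1] + (ch == "(") - (ch == ")"))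
--     bounds = [
--         i
--         for i in range(n)
--         if depth[i] == 0
--         and up[i : i + 3] == "AND"
--         and (i == 0 or up[i - 1].isspace())
--         and (i + 3 >= n or up[i + 3].isspace())
--     ]
--     parts: List[str] = []
--     prev = 0
--     for b in bounds:
--         piece = s[prev:b].strip()
--         if piece:
--             parts.append(piece)
--         prev = b + 3
--     tail = s[prev:].strip()
--     if tail:
--         parts.append(tail)
--     return parts
-- ===== Notes on version B (the rewrite author's own statement) =====
-- stated objective: alternative
-- what changed: Replaced A's fused single-pass scanner (running buffer, running depth, skip-ahead index) with a build-table-then-slice decomposition: a prefix parenthesis-depth table, then the list of top-level AND boundary indices, then slicing the string between consecutive boundaries.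
import Mathlib
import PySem

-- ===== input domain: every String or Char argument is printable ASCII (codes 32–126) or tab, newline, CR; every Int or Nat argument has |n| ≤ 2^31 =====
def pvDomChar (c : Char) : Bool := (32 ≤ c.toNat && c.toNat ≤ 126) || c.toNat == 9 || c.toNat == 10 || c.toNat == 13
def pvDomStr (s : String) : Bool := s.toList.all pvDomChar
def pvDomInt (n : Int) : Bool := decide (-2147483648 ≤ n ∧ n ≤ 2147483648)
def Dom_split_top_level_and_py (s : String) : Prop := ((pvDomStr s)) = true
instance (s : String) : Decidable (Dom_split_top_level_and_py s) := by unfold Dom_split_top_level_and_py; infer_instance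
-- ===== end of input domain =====

-- B replaces A's fused running-buffer scanner by a prefix-depth table + boundary list + slicing (different decomposition, same cost).

-- ===== PORT A =====
-- literal transliteration of A's while-loop: state (parts, buf, depth), index i, steps by 1 or by 3 after a matched AND
def pvLoopA (cs up : List Char) (i : Nat) (parts : List String) (buf : List Char) (depth : Int) : List String :=
  if h : i < cs.length then
    let ch := cs[i]
    let depth := if ch = '(' then depth + 1 else if ch = ')' then depth - 1 else depth
    if depth = 0 ∧ PySem.List.slice up (some (i : Int)) (some ((i : Int) + 3)) = ['A', 'N', 'D'] ∧
        (i = 0 ∨ (PySem.List.pyGet? up ((i : Int) - 1)).any PySem.Chars.isspace) ∧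
        ((i : Int) + 3 ≥ (cs.length : Int) ∨ (PySem.List.pyGet? up ((i : Int) + 3)).any PySem.Chars.isspace) then
      let piece := PySem.Chars.strip buf
      let parts := if piece ≠ [] then parts ++ [String.ofList piece] else parts
      pvLoopA cs up (i + 3) parts [] depth
    else
      pvLoopA cs up (i + 1) parts (buf ++ [ch]) depth
  else
    let tail := PySem.Chars.strip buf
    if tail ≠ [] then parts ++ [String.ofList tail] else parts
termination_by cs.length - i
decreasing_by all_goals omega

def split_top_level_and_py (s : String) : List String :=
  pvLoopA s.toList (PySem.Chars.upper s.toList) 0 [] [] 0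

-- ===== PORT B =====
-- Source B: prefix-depth table, then the list of top-level AND boundaries, then slice between consecutive boundaries
def split_top_level_and_py_alt (s : String) : List String :=
  let cs := s.toList
  let n := cs.length
  let up := PySem.Chars.upper cs
  let depth := cs.foldl (fun acc ch =>
      acc ++ [acc.getLastD 0 + (if ch = '(' then (1 : Int) else 0) - (if ch = ')' then 1 else 0)]) [0]
  let bounds := (List.range n).filter (fun i =>
      depth.getD i 0 == 0 &&
      PySem.List.slice up (some (i : Int)) (some ((i : Int) + 3)) == ['A', 'N', 'D'] &&
      (i == 0 || (PySem.List.pyGet? up ((i : Int) - 1)).any PySem.Chars.isspace) &&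
      (decide ((i : Int) + 3 ≥ (n : Int)) || (PySem.List.pyGet? up ((i : Int) + 3)).any PySem.Chars.isspace))
  let st := bounds.foldl (fun (st : List String × Nat) (b : Nat) =>
      let piece := PySem.Chars.strip (PySem.List.slice cs (some (st.2 : Int)) (some (b : Int)))
      ((if piece ≠ [] then st.1 ++ [String.ofList piece] else st.1), b + 3)) ([], 0)
  let tail := PySem.Chars.strip (PySem.List.slice cs (some (st.2 : Int)) none)
  if tail ≠ [] then st.1 ++ [String.ofList tail] else st.1

-- ===== PRECONDITION & SPEC =====
def Spec_split_top_level_and_py (s : String) (out : List String) : Prop := out = split_top_level_and_py_alt s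
instance (s : String) (out : List String) : Decidable (Spec_split_top_level_and_py s out) := by unfold Spec_split_top_level_and_py; infer_instance

-- ===== CLAIM (what is proved, stated in full; the proofs are below) =====
def Claim_equal_split_top_level_and_py : Prop := ∀ (s : String), Dom_split_top_level_and_py s → Spec_split_top_level_and_py s (split_top_level_and_py s)


-- ===== LEMMAS AND PROOFS =====

-- B's fold step, named for the proofs
def pvStepB (cs : List Char) (st : List String × Nat) (b : Nat) : List String × Nat :=
  let piece := PySem.Chars.strip (PySem.List.slice cs (some (st.2 : Int)) (some (b : Int)))
  ((if piece ≠ [] then st.1 ++ [String.ofList piece] else st.1), b + 3)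

-- paren-depth step and prefix depth
def pvStepD (d : Int) (c : Char) : Int := if c = '(' then d + 1 else if c = ')' then d - 1 else d

def pvPd (cs : List Char) (i : Nat) : Int := (cs.take i).foldl pvStepD 0

-- the boundary predicate, phrased with pvPd
def pvIsB (cs up : List Char) (i : Nat) : Bool :=
  pvPd cs i == 0 &&
  PySem.List.slice up (some (i : Int)) (some ((i : Int) + 3)) == ['A', 'N', 'D'] &&
  (i == 0 || (PySem.List.pyGet? up ((i : Int) - 1)).any PySem.Chars.isspace) &&
  (decide ((i : Int) + 3 ≥ (cs.length : Int)) || (PySem.List.pyGet? up ((i : Int) + 3)).any PySem.Chars.isspace)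

def pvEmit (l : List Char) : List String := if l ≠ [] then [String.ofList l] else []

-- reference segmentation: A's control flow with the boundary test abstracted to pvIsB
def pvSegs (cs up : List Char) (buf : List Char) (i : Nat) : List String :=
  if h : i < cs.length then
    if pvIsB cs up i then
      pvEmit (PySem.Chars.strip buf) ++ pvSegs cs up [] (i + 3)
    else
      pvSegs cs up (buf ++ [cs[i]]) (i + 1)
  else
    pvEmit (PySem.Chars.strip buf)
termination_by cs.length - i
decreasing_by all_goals omega

-- slices between consecutive boundaries, recursively
def pvG (cs : List Char) (prev : Nat) (bs : List Nat) : List String :=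
  match bs with
  | [] => pvEmit (PySem.Chars.strip (cs.drop prev))
  | b :: bs => pvEmit (PySem.Chars.strip ((cs.drop prev).take (b - prev))) ++ pvG cs (b + 3) bs

def pvBoundsFrom (cs up : List Char) (i : Nat) : List Nat :=
  (List.range' i (cs.length - i)).filter (pvIsB cs up)

-- running depth scan of B's table-building fold
def pvScan (d : Int) (cs : List Char) : List Int :=
  match cs with
  | [] => []
  | c :: cs => pvStepD d c :: pvScan (pvStepD d c) cs

theorem pv_upper_eq_map (cs : List Char) : PySem.Chars.upper cs = cs.map PySem.Chars.upperChar := rfl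

theorem pv_nonparen_of_upper {c a : Char} (ha : a = 'A' ∨ a = 'N' ∨ a = 'D')
    (h : PySem.Chars.upperChar c = a) : c ≠ '(' ∧ c ≠ ')' := by
  constructor <;> rintro rfl <;>
    rcases ha with rfl | rfl | rfl <;> exact absurd h (by decide)

theorem pv_slice3 (up : List Char) (i : Nat) :
    PySem.List.slice up (some (i : Int)) (some ((i : Int) + 3)) = (up.drop i).take 3 := by
  have h3 : ((i : Int) + 3) = ((i : Int) + ((3 : Nat) : Int)) := by norm_num
  rw [h3, PySem.List.slice_natCast_add]

theorem pv_and_shape (up : List Char) (i : Nat)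
    (hS : PySem.List.slice up (some (i : Int)) (some ((i : Int) + 3)) = ['A', 'N', 'D']) :
    i + 3 ≤ up.length ∧ up[i]? = some 'A' ∧ up[i + 1]? = some 'N' ∧ up[i + 2]? = some 'D' := by
  rw [pv_slice3] at hS
  have hlen : 3 ≤ (up.drop i).length := by
    have := congrArg List.length hS
    simp [List.length_take] at this
    simpa using this
  have hd : up.drop i = ['A', 'N', 'D'] ++ (up.drop i).drop 3 := by
    conv_lhs => rw [← List.take_append_drop 3 (up.drop i)]
    rw [hS]
  have hl : i + 3 ≤ up.length := by
    have hld : (up.drop i).length = up.length - i := List.length_drop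
    omega
  have h0 : (up.drop i)[(0 : Nat)]? = up[i + 0]? := List.getElem?_drop
  have h1 : (up.drop i)[(1 : Nat)]? = up[i + 1]? := List.getElem?_drop
  have h2 : (up.drop i)[(2 : Nat)]? = up[i + 2]? := List.getElem?_drop
  rw [hd] at h0 h1 h2
  simp only [Nat.add_zero] at h0
  exact ⟨hl, by rw [← h0]; rfl, by rw [← h1]; rfl, by rw [← h2]; rfl⟩

theorem pv_pd_succ (cs : List Char) (i : Nat) (h : i < cs.length) :
    pvPd cs (i + 1) = pvStepD (pvPd cs i) cs[i] := by
  unfold pvPd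
  rw [List.take_add_one, List.getElem?_eq_getElem h, List.foldl_append]
  rfl


-- at an index whose uppercase letter is A/N/D the depth step is the identity
theorem pv_step_id (cs : List Char) (j : Nat) (hj : j < cs.length) (a : Char)
    (ha : a = 'A' ∨ a = 'N' ∨ a = 'D') (hja : (PySem.Chars.upper cs)[j]? = some a) :
    ∀ d, pvStepD d cs[j] = d := by
  intro d
  rw [pv_upper_eq_map, List.getElem?_map, List.getElem?_eq_getElem hj] at hja
  simp only [Option.map_some, Option.some.injEq] at hja
  obtain ⟨hne1, hne2⟩ := pv_nonparen_of_upper ha hja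
  simp [pvStepD, hne1, hne2]

-- under a matched AND at i, the three skipped characters do not change the depth
theorem pv_pd_plus3 (cs : List Char) (i : Nat) (h : i < cs.length)
    (hS : PySem.List.slice (PySem.Chars.upper cs) (some (i : Int)) (some ((i : Int) + 3)) = ['A', 'N', 'D']) :
    pvPd cs (i + 3) = pvPd cs (i + 1) ∧ pvStepD (pvPd cs i) cs[i] = pvPd cs i ∧ i + 3 ≤ cs.length := by
  have hup : (PySem.Chars.upper cs).length = cs.length := by rw [pv_upper_eq_map]; simp
  obtain ⟨hl, h0, h1, h2⟩ := pv_and_shape _ _ hS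
  rw [hup] at hl
  have e1 : pvPd cs (i + 1 + 1) = pvPd cs (i + 1) := by
    rw [pv_pd_succ cs (i + 1) (by omega)]
    exact pv_step_id cs (i + 1) (by omega) 'N' (by simp) h1 _
  have e2 : pvPd cs (i + 1 + 1 + 1) = pvPd cs (i + 1 + 1) := by
    rw [pv_pd_succ cs (i + 1 + 1) (by omega)]
    exact pv_step_id cs (i + 2) (by omega) 'D' (by simp) h2 _
  refine ⟨?_, ?_, hl⟩
  · show pvPd cs (i + 1 + 1 + 1) = pvPd cs (i + 1)
    rw [e2, e1]
  · have hst : pvStepD (pvPd cs i) cs[i] = pvPd cs i :=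
      pv_step_id cs i h 'A' (by simp) h0 _
    exact hst

-- A's fused test (depth updated through s[i]) agrees with pvIsB
theorem pv_cond_iff (cs : List Char) (i : Nat) (h : i < cs.length) :
    ((if cs[i] = '(' then pvPd cs i + 1 else if cs[i] = ')' then pvPd cs i - 1 else pvPd cs i) = 0 ∧
      PySem.List.slice (PySem.Chars.upper cs) (some (i : Int)) (some ((i : Int) + 3)) = ['A', 'N', 'D'] ∧
      (i = 0 ∨ (PySem.List.pyGet? (PySem.Chars.upper cs) ((i : Int) - 1)).any PySem.Chars.isspace) ∧
      ((i : Int) + 3 ≥ (cs.length : Int) ∨ (PySem.List.pyGet? (PySem.Chars.upper cs) ((i : Int) + 3)).any PySem.Chars.isspace))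
    ↔ pvIsB cs (PySem.Chars.upper cs) i = true := by
  by_cases hS : PySem.List.slice (PySem.Chars.upper cs) (some (i : Int)) (some ((i : Int) + 3)) = ['A', 'N', 'D']
  · obtain ⟨hl, h0, _, _⟩ := pv_and_shape _ _ hS
    have hstep : (if cs[i] = '(' then pvPd cs i + 1 else if cs[i] = ')' then pvPd cs i - 1 else pvPd cs i) = pvPd cs i :=
      pv_step_id cs i h 'A' (by simp) h0 (pvPd cs i)
    rw [hstep]
    unfold pvIsB
    simp only [Bool.and_eq_true, beq_iff_eq, Bool.or_eq_true, decide_eq_true_eq]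
    constructor
    · rintro ⟨h1, h2, h3, h4⟩
      refine ⟨⟨⟨h1, h2⟩, ?_⟩, ?_⟩
      · rcases h3 with h3 | h3
        · exact Or.inl (by simpa using h3)
        · exact Or.inr h3
      · exact h4
    · rintro ⟨⟨⟨h1, h2⟩, h3⟩, h4⟩
      refine ⟨h1, h2, ?_, h4⟩
      rcases h3 with h3 | h3
      · exact Or.inl (by simpa using h3)
      · exact Or.inr h3
  · constructor
    · rintro ⟨_, h2, _⟩; exact absurd h2 hS
    · intro hB
      unfold pvIsB at hB
      simp only [Bool.and_eq_true, beq_iff_eq] at hB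
      exact absurd hB.1.1.2 hS

-- no boundary can start inside a matched AND
theorem pv_isB_next_false (cs : List Char) (i : Nat) (h : i < cs.length)
    (hB : pvIsB cs (PySem.Chars.upper cs) i = true) :
    pvIsB cs (PySem.Chars.upper cs) (i + 1) = false ∧ pvIsB cs (PySem.Chars.upper cs) (i + 2) = false := by
  unfold pvIsB at hB
  simp only [Bool.and_eq_true, beq_iff_eq] at hB
  obtain ⟨hl, h0, h1, h2⟩ := pv_and_shape _ _ hB.1.1.2
  have hA : Option.any PySem.Chars.isspace (some 'A') = false := by decide
  have hN : Option.any PySem.Chars.isspace (some 'N') = false := by decide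
  have g1 : (PySem.List.pyGet? (PySem.Chars.upper cs) ((i : Int) + 2 - 1)).any PySem.Chars.isspace = false := by
    have e : ((i : Int) + 2 - 1) = (((i + 1 : Nat)) : Int) := by push_cast; ring
    rw [e, PySem.List.pyGet?_natCast, h1]; exact hN
  constructor <;> · unfold pvIsB; simp [h0, h1, hA, hN, g1]

theorem pv_loopA_eq (cs : List Char) :
    ∀ (m i : Nat) (parts : List String) (buf : List Char), cs.length - i ≤ m →
      pvLoopA cs (PySem.Chars.upper cs) i parts buf (pvPd cs i) = parts ++ pvSegs cs (PySem.Chars.upper cs) buf i := by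
  intro m
  induction m with
  | zero =>
    intro i parts buf hm
    have hni : ¬ i < cs.length := by omega
    rw [pvLoopA, pvSegs, dif_neg hni, dif_neg hni]
    unfold pvEmit
    split_ifs <;> simp_all
  | succ m ih =>
    intro i parts buf hm
    by_cases hi : i < cs.length
    · rw [pvLoopA, pvSegs, dif_pos hi, dif_pos hi]
      dsimp only
      by_cases hC : pvIsB cs (PySem.Chars.upper cs) i = true
      · have hc := (pv_cond_iff cs i hi).mpr hC
        rw [if_pos hc, if_pos hC]
        obtain ⟨e3, estep, hl3⟩ := pv_pd_plus3 cs i hi hc.2.1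
        have e : (if cs[i] = '(' then pvPd cs i + 1 else if cs[i] = ')' then pvPd cs i - 1 else pvPd cs i)
            = pvPd cs (i + 3) := by
          show pvStepD (pvPd cs i) cs[i] = pvPd cs (i + 3)
          rw [← pv_pd_succ cs i hi]
          exact (e3 : pvPd cs (i + 3) = pvPd cs (i + 1)).symm
        rw [e, ih (i + 3) _ [] (by omega)]
        unfold pvEmit
        split_ifs <;> simp_all
      · have hc : ¬ ((if cs[i] = '(' then pvPd cs i + 1 else if cs[i] = ')' then pvPd cs i - 1 else pvPd cs i) = 0 ∧
            PySem.List.slice (PySem.Chars.upper cs) (some (i : Int)) (some ((i : Int) + 3)) = ['A', 'N', 'D'] ∧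
            (i = 0 ∨ (PySem.List.pyGet? (PySem.Chars.upper cs) ((i : Int) - 1)).any PySem.Chars.isspace) ∧
            ((i : Int) + 3 ≥ (cs.length : Int) ∨ (PySem.List.pyGet? (PySem.Chars.upper cs) ((i : Int) + 3)).any PySem.Chars.isspace)) :=
          fun hcc => hC ((pv_cond_iff cs i hi).mp hcc)
        rw [if_neg hc, if_neg hC]
        have e : (if cs[i] = '(' then pvPd cs i + 1 else if cs[i] = ')' then pvPd cs i - 1 else pvPd cs i)
            = pvPd cs (i + 1) := by
          show pvStepD (pvPd cs i) cs[i] = pvPd cs (i + 1)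
          exact (pv_pd_succ cs i hi).symm
        rw [e, ih (i + 1) parts (buf ++ [cs[i]]) (by omega)]
    · have hni := hi
      rw [pvLoopA, pvSegs, dif_neg hni, dif_neg hni]
      unfold pvEmit
      split_ifs <;> simp_all

theorem pv_fold_parts (cs : List Char) :
    ∀ (bs : List Nat) (parts : List String) (prev : Nat),
      bs.foldl (pvStepB cs) (parts, prev) =
        (parts ++ (bs.foldl (pvStepB cs) ([], prev)).1, (bs.foldl (pvStepB cs) ([], prev)).2) := by
  intro bs
  induction bs with
  | nil => intro parts prev; simp
  | cons b bs ih =>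
    intro parts prev
    simp only [List.foldl_cons]
    have hstep : ∀ P : List String, pvStepB cs (P, prev) b =
        (P ++ (if PySem.Chars.strip (PySem.List.slice cs (some (prev : Int)) (some (b : Int))) ≠ [] then
          [String.ofList (PySem.Chars.strip (PySem.List.slice cs (some (prev : Int)) (some (b : Int))))] else []), b + 3) := by
      intro P
      unfold pvStepB
      dsimp only
      split_ifs <;> simp
    rw [hstep, hstep]
    simp only [List.nil_append]
    rw [ih]
    conv_rhs => rw [ih]
    simp [List.append_assoc]

theorem pv_fold_tail_eq_G (cs : List Char) :
    ∀ (bs : List Nat) (prev : Nat),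
      (bs.foldl (pvStepB cs) ([], prev)).1 ++ pvEmit (PySem.Chars.strip (cs.drop (bs.foldl (pvStepB cs) ([], prev)).2)) =
        pvG cs prev bs := by
  intro bs
  induction bs with
  | nil => intro prev; simp [pvG]
  | cons b bs ih =>
    intro prev
    simp only [List.foldl_cons, pvG]
    have hstep : ∀ P : List String, pvStepB cs (P, prev) b =
        (P ++ (if PySem.Chars.strip (PySem.List.slice cs (some (prev : Int)) (some (b : Int))) ≠ [] then
          [String.ofList (PySem.Chars.strip (PySem.List.slice cs (some (prev : Int)) (some (b : Int))))] else []), b + 3) := by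
      intro P
      unfold pvStepB
      dsimp only
      split_ifs <;> simp
    rw [hstep]
    simp only [List.nil_append]
    rw [pv_fold_parts cs bs _ (b + 3)]
    dsimp only
    rw [List.append_assoc, ih (b + 3), PySem.List.slice_natCast]
    rfl

theorem pv_segs_eq (cs : List Char) :
    ∀ (m i prev : Nat), cs.length - i ≤ m → prev ≤ i →
      pvSegs cs (PySem.Chars.upper cs) ((cs.drop prev).take (i - prev)) i =
        pvG cs prev (pvBoundsFrom cs (PySem.Chars.upper cs) i) := by
  intro m
  induction m with
  | zero =>
    intro i prev hm hpi
    have hni : ¬ i < cs.length := by omega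
    rw [pvSegs, dif_neg hni]
    unfold pvBoundsFrom
    rw [show cs.length - i = 0 by omega]
    simp only [List.range'_zero, List.filter_nil, pvG]
    rw [List.take_of_length_le (by simp; omega)]
  | succ m ih =>
    intro i prev hm hpi
    by_cases hi : i < cs.length
    · rw [pvSegs, dif_pos hi]
      by_cases hB : pvIsB cs (PySem.Chars.upper cs) i = true
      · -- boundary at i
        have hS : PySem.List.slice (PySem.Chars.upper cs) (some (i : Int)) (some ((i : Int) + 3)) = ['A', 'N', 'D'] := by
          unfold pvIsB at hB
          simp only [Bool.and_eq_true, beq_iff_eq] at hB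
          exact hB.1.1.2
        have hup : (PySem.Chars.upper cs).length = cs.length := by rw [pv_upper_eq_map]; simp
        obtain ⟨hl, -, -, -⟩ := pv_and_shape _ _ hS
        rw [hup] at hl
        obtain ⟨hn1, hn2⟩ := pv_isB_next_false cs i hi hB
        have hr : List.range' i (cs.length - i) =
            i :: (i + 1) :: (i + 1 + 1) :: List.range' (i + 1 + 1 + 1) (cs.length - (i + 3)) := by
          rw [show cs.length - i = (cs.length - (i + 3)) + 1 + 1 + 1 by omega]
          simp [List.range'_succ]
        rw [hB, if_pos rfl]
        unfold pvBoundsFrom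
        rw [hr]
        simp only [List.filter_cons, hB, hn1, hn2]
        simp only [decide_true, Bool.false_eq_true, if_false, if_true]
        rw [show (i + 1 + 1 + 1) = i + 3 from rfl]
        have hGh : pvG cs prev (i :: (List.range' (i + 3) (cs.length - (i + 3))).filter (pvIsB cs (PySem.Chars.upper cs))) =
            pvEmit (PySem.Chars.strip ((cs.drop prev).take (i - prev))) ++
              pvG cs (i + 3) ((List.range' (i + 3) (cs.length - (i + 3))).filter (pvIsB cs (PySem.Chars.upper cs))) := rfl
        rw [hGh]
        congr 1
        have := ih (i + 3) (i + 3) (by omega) (by omega)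
        unfold pvBoundsFrom at this
        rw [← this]
        simp
      · -- no boundary at i
        rw [if_neg hB]
        have hbuf : (cs.drop prev).take (i - prev) ++ [cs[i]] = (cs.drop prev).take ((i + 1) - prev) := by
          rw [show (i + 1) - prev = (i - prev) + 1 by omega, List.take_add_one]
          have hg : (cs.drop prev)[i - prev]? = some cs[i] := by
            rw [List.getElem?_drop, show prev + (i - prev) = i by omega, List.getElem?_eq_getElem hi]
          rw [hg]
          rfl
        rw [hbuf, ih (i + 1) prev (by omega) (by omega)]
        unfold pvBoundsFrom
        rw [show cs.length - i = (cs.length - (i + 1)) + 1 by omega, List.range'_succ]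
        simp only [List.filter_cons, hB]
        simp
    · have hni := hi
      rw [pvSegs, dif_neg hni]
      unfold pvBoundsFrom
      rw [show cs.length - i = 0 by omega]
      simp only [List.range'_zero, List.filter_nil, pvG]
      rw [List.take_of_length_le (by simp; omega)]

theorem pv_depth_foldl (cs : List Char) :
    ∀ (acc : List Int) (d : Int),
      cs.foldl (fun acc ch => acc ++ [acc.getLastD 0 + (if ch = '(' then (1 : Int) else 0) - (if ch = ')' then 1 else 0)]) (acc ++ [d]) =
        acc ++ [d] ++ pvScan d cs := by
  intro acc
  induction cs generalizing acc with
  | nil => intro d; simp [pvScan]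
  | cons c cs ih =>
    intro d
    simp only [List.foldl_cons]
    have hl : (acc ++ [d]).getLastD 0 = d := by simp
    rw [hl]
    have harith : d + (if c = '(' then (1 : Int) else 0) - (if c = ')' then 1 else 0) = pvStepD d c := by
      unfold pvStepD
      split_ifs <;> simp_all
    rw [harith, show acc ++ [d] ++ [pvStepD d c] = (acc ++ [d]) ++ [pvStepD d c] from rfl, ih (acc ++ [d]) (pvStepD d c)]
    simp [pvScan]

theorem pv_scan_getD (cs : List Char) :
    ∀ (d : Int) (i : Nat), i ≤ cs.length → ((d :: pvScan d cs).getD i 0) = (cs.take i).foldl pvStepD d := by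
  intro d i
  induction cs generalizing d i with
  | nil =>
    intro hi
    have h0 : i = 0 := by simp at hi; omega
    subst h0
    simp [pvScan]
  | cons c cs ih =>
    intro hi
    cases i with
    | zero => simp
    | succ j =>
      simp only [pvScan, List.getD_cons_succ, List.take_succ_cons, List.foldl_cons]
      exact ih (pvStepD d c) j (by simpa using hi)

theorem pv_bounds_eq (cs : List Char) :
    ((List.range cs.length).filter (fun i =>
      ((cs.foldl (fun acc ch => acc ++ [acc.getLastD 0 + (if ch = '(' then (1 : Int) else 0) - (if ch = ')' then 1 else 0)]) [0]).getD i 0) == 0 &&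
      PySem.List.slice (PySem.Chars.upper cs) (some (i : Int)) (some ((i : Int) + 3)) == ['A', 'N', 'D'] &&
      (i == 0 || (PySem.List.pyGet? (PySem.Chars.upper cs) ((i : Int) - 1)).any PySem.Chars.isspace) &&
      (decide ((i : Int) + 3 ≥ (cs.length : Int)) || (PySem.List.pyGet? (PySem.Chars.upper cs) ((i : Int) + 3)).any PySem.Chars.isspace)))
    = pvBoundsFrom cs (PySem.Chars.upper cs) 0 := by
  rw [List.range_eq_range']
  unfold pvBoundsFrom
  rw [Nat.sub_zero]
  apply List.filter_congr
  intro i hi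
  have hilt : i < cs.length := by
    have := List.mem_range'_1.mp hi
    omega
  have hd : (cs.foldl (fun acc ch => acc ++ [acc.getLastD 0 + (if ch = '(' then (1 : Int) else 0) - (if ch = ')' then 1 else 0)]) [0]).getD i 0 = pvPd cs i := by
    have h1 := pv_depth_foldl cs [] 0
    simp only [List.nil_append] at h1
    rw [h1]
    exact pv_scan_getD cs 0 i (by omega)
  unfold pvIsB
  rw [hd]

-- ===== VERDICT (by name: the statement is the Claim_ definition above) =====
theorem split_top_level_and_py_spec : Claim_equal_split_top_level_and_py := by
  intro s _
  unfold Spec_split_top_level_and_py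
  have hA : split_top_level_and_py s = pvG s.toList 0 (pvBoundsFrom s.toList (PySem.Chars.upper s.toList) 0) := by
    unfold split_top_level_and_py
    have h1 : pvLoopA s.toList (PySem.Chars.upper s.toList) 0 [] [] 0 =
        [] ++ pvSegs s.toList (PySem.Chars.upper s.toList) [] 0 :=
      pv_loopA_eq s.toList s.toList.length 0 [] [] (by omega)
    rw [h1]
    simp only [List.nil_append]
    have h2 := pv_segs_eq s.toList s.toList.length 0 0 (by omega) (le_refl 0)
    simpa using h2
  have hB : split_top_level_and_py_alt s = pvG s.toList 0 (pvBoundsFrom s.toList (PySem.Chars.upper s.toList) 0) := by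
    unfold split_top_level_and_py_alt
    dsimp only
    rw [pv_bounds_eq]
    have hlam : (fun (st : List String × Nat) (b : Nat) =>
        (if PySem.Chars.strip (PySem.List.slice s.toList (some (st.2 : Int)) (some (b : Int))) ≠ [] then
            st.1 ++ [String.ofList (PySem.Chars.strip (PySem.List.slice s.toList (some (st.2 : Int)) (some (b : Int))))]
          else st.1, b + 3)) = pvStepB s.toList := rfl
    rw [hlam]
    rw [PySem.List.slice_from_natCast]
    rw [← pv_fold_tail_eq_G s.toList (pvBoundsFrom s.toList (PySem.Chars.upper s.toList) 0) 0]
    unfold pvEmit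
    split_ifs <;> simp_all
  rw [hA, hB]
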